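-- pv_equiv track=rewrite | github.com/YuHuanTin/IDAPyUtils | X64Dbg/main.py | GetCleanRanges
-- ===== SOURCE A (Python) =====
-- def MergeRanges(ranges: list[tuple[int, int]]) -> list[tuple[int, int]]:
--     if not ranges:
--         return []
--     ranges = sorted((start, end) for start, end in ranges if end > start)
--     merged: list[list[int]] = []
--     for start, end in ranges:
--         if not merged or start > merged[-1][1]:
--             merged.append([start, end])
--         else:
--             merged[-1][1] = max(merged[-1][1], end)
--     return [(start, end) for start, end in merged]
--
-- def GetDirtyRanges(state, start: int, end: int) -> list[tuple[int, int]]: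
--     if state is None:
--         return []
--     ranges = []
--     for dirty_start, dirty_end in state.get('uc_dirty_ranges', []):
--         overlap_start = max(start, dirty_start)
--         overlap_end = min(end, dirty_end)
--         if overlap_end > overlap_start:
--             ranges.append((overlap_start, overlap_end))
--     return MergeRanges(ranges)
--
-- def GetCleanRanges(state, start: int, end: int) -> list[tuple[int, int]]:
--     dirty_ranges = GetDirtyRanges(state, start, end)
--     clean_ranges = []
--     cur = start
--     for dirty_start, dirty_end in dirty_ranges:
--         if cur < dirty_start:
--             clean_ranges.append((cur, dirty_start))
--         cur = max(cur, dirty_end)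
--     if cur < end:
--         clean_ranges.append((cur, end))
--     return clean_ranges
-- ===== SOURCE B (Python) =====
-- def GetCleanRanges(state, start: int, end: int) -> list[tuple[int, int]]:
--     # One sort-and-sweep pass: clip dirty ranges to [start, end), sort them,
--     # and emit the gaps directly while tracking the furthest covered point.
--     # No separate merge pass and no intermediate merged list.
--     if state is None:
--         covered = []
--     else:
--         covered = sorted(
--             (max(start, ds), min(end, de))
--             for ds, de in state.get('uc_dirty_ranges', [])
--             if min(end, de) > max(start, ds)
--         )
--     clean = []
--     cur = start
--     for a, b in covered:
--         if a > cur: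
--             clean.append((cur, a))
--         if b > cur:
--             cur = b
--     if cur < end:
--         clean.append((cur, end))
--     return clean
-- ===== Notes on version B (the rewrite author's own statement) =====
-- stated objective: simpler
-- what changed: Replaces the clip-then-MergeRanges-then-complement pipeline (three functions, a sort plus an explicit merge pass building a merged list, then a second scan turning it into gaps) with a single sort-and-sweep: clip each range, sort the clipped ranges once, and emit the clean gaps directly in one pass tracking the furthest covered point.
import Mathlib
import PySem

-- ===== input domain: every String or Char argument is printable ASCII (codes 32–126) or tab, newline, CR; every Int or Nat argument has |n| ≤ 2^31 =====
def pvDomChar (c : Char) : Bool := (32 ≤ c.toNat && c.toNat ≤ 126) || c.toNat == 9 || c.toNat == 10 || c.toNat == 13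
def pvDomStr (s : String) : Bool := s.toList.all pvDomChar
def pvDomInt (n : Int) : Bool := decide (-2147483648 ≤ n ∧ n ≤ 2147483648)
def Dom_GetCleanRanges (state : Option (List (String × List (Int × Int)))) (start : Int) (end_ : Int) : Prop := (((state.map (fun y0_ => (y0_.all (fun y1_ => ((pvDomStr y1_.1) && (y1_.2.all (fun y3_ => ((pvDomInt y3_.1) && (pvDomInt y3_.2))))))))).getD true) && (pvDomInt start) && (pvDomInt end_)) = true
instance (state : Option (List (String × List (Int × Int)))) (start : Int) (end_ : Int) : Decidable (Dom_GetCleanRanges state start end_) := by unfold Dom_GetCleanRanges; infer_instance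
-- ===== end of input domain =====

-- B replaces A's clip → MergeRanges → complement pipeline with a single sort-and-sweep
-- that emits the clean gaps directly (objective: simpler; same O(n log n) cost).


-- ===== PORT A =====
-- body of A's merge loop: `if not merged or start > merged[-1][1]: merged.append([start,end])
--   else: merged[-1][1] = max(merged[-1][1], end)` (merged[-1] only read when merged ≠ [])
def pvMergeStep (merged : List (Int × Int)) (p : Int × Int) : List (Int × Int) :=
  if merged = [] ∨ p.1 > (merged.getLastD (0, 0)).2 then
    merged ++ [p]
  else
    merged.dropLast ++ [((merged.getLastD (0, 0)).1, max (merged.getLastD (0, 0)).2 p.2)]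

def MergeRanges (ranges : List (Int × Int)) : List (Int × Int) :=
  if ranges = [] then []
  else
    let sortedRanges := PySem.List.sorted2 (ranges.filter (fun p => decide (p.2 > p.1))) Prod.fst Prod.snd
    let merged := sortedRanges.foldl pvMergeStep []
    merged.map (fun p => (p.1, p.2))

def GetDirtyRanges (state : Option (List (String × List (Int × Int)))) (start : Int) (end_ : Int) : List (Int × Int) :=
  match state with
  | none => []
  | some st =>
    let ranges := (PySem.Dict.getD (PySem.Dict.mk st) "uc_dirty_ranges" []).foldl
      (fun acc (p : Int × Int) => if min end_ p.2 > max start p.1 then acc ++ [(max start p.1, min end_ p.2)] else acc) []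
    MergeRanges ranges

-- body of A's gap loop: `if cur < dirty_start: clean.append((cur, dirty_start)); cur = max(cur, dirty_end)`
def pvGapStepA (acc : List (Int × Int) × Int) (p : Int × Int) : List (Int × Int) × Int :=
  ((if acc.2 < p.1 then acc.1 ++ [(acc.2, p.1)] else acc.1), max acc.2 p.2)

def GetCleanRanges (state : Option (List (String × List (Int × Int)))) (start : Int) (end_ : Int) : List (Int × Int) :=
  let dirty := GetDirtyRanges state start end_
  let res := dirty.foldl pvGapStepA ([], start)
  if res.2 < end_ then res.1 ++ [(res.2, end_)] else res.1

-- ===== PORT B =====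
-- body of B's sweep loop: `if a > cur: clean.append((cur, a)); if b > cur: cur = b`
def pvSweepStepB (acc : List (Int × Int) × Int) (p : Int × Int) : List (Int × Int) × Int :=
  ((if p.1 > acc.2 then acc.1 ++ [(acc.2, p.1)] else acc.1), if p.2 > acc.2 then p.2 else acc.2)

def GetCleanRanges_alt (state : Option (List (String × List (Int × Int)))) (start : Int) (end_ : Int) : List (Int × Int) :=
  let covered :=
    match state with
    | none => []
    | some st =>
      PySem.List.sorted2
        (((PySem.Dict.getD (PySem.Dict.mk st) "uc_dirty_ranges" []).filter
            (fun p : Int × Int => decide (min end_ p.2 > max start p.1))).map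
          (fun p : Int × Int => (max start p.1, min end_ p.2)))
        Prod.fst Prod.snd
  let res := covered.foldl pvSweepStepB ([], start)
  if res.2 < end_ then res.1 ++ [(res.2, end_)] else res.1

-- ===== PRECONDITION & SPEC =====
def Spec_GetCleanRanges (state : Option (List (String × List (Int × Int)))) (start : Int) (end_ : Int) (out : List (Int × Int)) : Prop := out = GetCleanRanges_alt state start end_
instance (state : Option (List (String × List (Int × Int)))) (start : Int) (end_ : Int) (out : List (Int × Int)) : Decidable (Spec_GetCleanRanges state start end_ out) := by unfold Spec_GetCleanRanges; infer_instance

-- ===== CLAIM (what is proved, stated in full; the proofs are below) =====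
def Claim_equal_GetCleanRanges : Prop := ∀ (state : Option (List (String × List (Int × Int)))) (start : Int) (end_ : Int), Dom_GetCleanRanges state start end_ → Spec_GetCleanRanges state start end_ (GetCleanRanges state start end_)

-- ===== LEMMAS AND PROOFS =====

-- A's gap step and B's sweep step are the same state transformer.
lemma gapStep_eq_sweepStep : pvGapStepA = pvSweepStepB := by
  funext acc p
  unfold pvGapStepA pvSweepStepB
  refine Prod.ext ?_ ?_
  · rfl
  · simp only [max_def]
    split_ifs <;> omega

-- The merge loop only touches the last element: a frozen prefix passes through.
lemma mergeStep_append (M M' : List (Int × Int)) (hM' : M' ≠ []) (p : Int × Int) :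
    pvMergeStep (M ++ M') p = M ++ pvMergeStep M' p := by
  unfold pvMergeStep
  have hne : M ++ M' ≠ [] := by simp [hM']
  have hlast : (M ++ M').getLastD (0, 0) = M'.getLastD (0, 0) := by
    cases M' with
    | nil => exact absurd rfl hM'
    | cons a t =>
      have hsome : (a :: t).getLast? = some ((a :: t).getLast (by simp)) :=
        List.getLast?_eq_some_getLast _
      simp [List.getLastD_eq_getLast?, List.getLast?_append, hsome]
  have hdrop : (M ++ M').dropLast = M ++ M'.dropLast := List.dropLast_append_of_ne_nil hM'
  simp only [hne, hM', hlast, hdrop, false_or]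
  split_ifs <;> simp

lemma foldl_mergeStep_frozen (L : List (Int × Int)) :
    ∀ (M M' : List (Int × Int)), M' ≠ [] →
      L.foldl pvMergeStep (M ++ M') = M ++ L.foldl pvMergeStep M' := by
  induction L with
  | nil => intro M M' h; simp
  | cons y L ih =>
    intro M M' h
    have hne : pvMergeStep M' y ≠ [] := by
      unfold pvMergeStep; split_ifs <;> simp
    simp only [List.foldl_cons, mergeStep_append M M' h y]
    exact ih M _ hne

-- Core: sweeping the merged list produces the same state as sweeping the raw list.
lemma sweep_merge (L : List (Int × Int)) :
    ∀ (m : Int × Int) (c : List (Int × Int) × Int),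
      (L.foldl pvMergeStep [m]).foldl pvGapStepA c = L.foldl pvGapStepA (pvGapStepA c m) := by
  induction L with
  | nil => intro m c; simp [pvGapStepA]
  | cons y L ih =>
    intro m c
    by_cases h : y.1 > m.2
    · have hstep : pvMergeStep [m] y = [m] ++ [y] := by
        unfold pvMergeStep; simp [h]
      have : (y :: L).foldl pvMergeStep [m] = [m] ++ L.foldl pvMergeStep [y] := by
        simp only [List.foldl_cons, hstep]
        exact foldl_mergeStep_frozen L [m] [y] (by simp)
      rw [this, List.foldl_append]
      simp only [List.foldl_cons]
      exact ih y (pvGapStepA c m)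
    · have hstep : pvMergeStep [m] y = [(m.1, max m.2 y.2)] := by
        unfold pvMergeStep; simp [h]
      have hcomb : pvGapStepA c (m.1, max m.2 y.2) = pvGapStepA (pvGapStepA c m) y := by
        unfold pvGapStepA
        refine Prod.ext ?_ ?_
        · simp only []
          have : ¬ (max c.2 m.2 < y.1) := by omega
          simp [this]
        · simp only []
          omega
      simp only [List.foldl_cons, hstep, ih, hcomb]

-- Sweeping MergeRanges of a list of genuine ranges equals sweeping its sorted version.
lemma sweep_mergeRanges (cl : List (Int × Int)) (hcl : ∀ p ∈ cl, p.1 < p.2)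
    (c : List (Int × Int) × Int) :
    (MergeRanges cl).foldl pvGapStepA c
      = (PySem.List.sorted2 cl Prod.fst Prod.snd).foldl pvGapStepA c := by
  unfold MergeRanges
  by_cases h : cl = []
  · subst h; simp [PySem.List.sorted2]
  · have hfilter : cl.filter (fun p => decide (p.2 > p.1)) = cl :=
      List.filter_eq_self.mpr (fun p hp => by simpa using hcl p hp)
    simp only [h, hfilter]
    have hmap : ∀ (l : List (Int × Int)), l.map (fun p => (p.1, p.2)) = l := by
      intro l; simp
    rw [hmap]
    cases hs : PySem.List.sorted2 cl Prod.fst Prod.snd with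
    | nil => simp
    | cons z t =>
      have h0 : pvMergeStep [] z = [z] := by unfold pvMergeStep; simp
      simp only [List.foldl_cons, h0]
      exact sweep_merge t z c

-- ===== VERDICT (by name: the statement is the Claim_ definition above) =====
theorem GetCleanRanges_spec : Claim_equal_GetCleanRanges := by
  intro state start end_ _
  unfold Spec_GetCleanRanges GetCleanRanges GetCleanRanges_alt GetDirtyRanges
  cases state with
  | none => simp
  | some st =>
    simp only []
    rw [PySem.List.foldl_append_ite (p := fun p : Int × Int => min end_ p.2 > max start p.1)
          (f := fun p : Int × Int => (max start p.1, min end_ p.2))]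
    simp only [List.nil_append]
    rw [sweep_mergeRanges _ (by
      intro p hp
      simp only [List.mem_map, List.mem_filter] at hp
      obtain ⟨q, ⟨_, hq⟩, rfl⟩ := hp
      simpa using of_decide_eq_true hq)]
    rw [gapStep_eq_sweepStep]
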